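-- pv_equiv track=rewrite | github.com/AlitosJM/Examen | main.py | es_simetrico
-- ===== SOURCE A (Python) =====
-- def es_simetrico(n: int = 1) -> bool:
--     '''
--     La función recibe un número entero n y retorna bool verdadero
--     si la suma de la primera mitad de la cifra es iggual a la segunda mitad. E
--     Entrada n es una cifra par y  debera estar
--     acotada en el rango 10<=n<=10,000,000 \n
--     :param n:
--     :return bool:
--     '''
--
--     # Estas excepciones revisan que el dato sea tipo entero y que este dentro del rango determinado
--     if type(n) is not int:
--         raise TypeError("Error de tipo, solo enteros")
--     if n < 10 or n > 10E6:
--         raise ValueError("Número debe ser 10<= n <= 10,000,000")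
--
--     mi_numero = str(n)  # El número n se convierte a cadena para poder manejarlo como una lista o array
--     len_num = len(mi_numero)
--     resto = len_num % 2  # Se determina la longitud de la lista es par(0) o impar (1)
--     r = False
--
--     # Si la cifra es par la cifra y mayor a dos dígitos
--     if not resto and len_num > 2:
--         limite = len_num//2   # variable limite para poder acceder a la lista por mitad izquierda y derecha
--         suma0 = [int(numero) for numero in mi_numero[:limite]]  # mitad izquiera
--         suma1 = [int(numero) for numero in mi_numero[-limite:]]  # mitad derecha
--         r = True if sum(suma0) == sum(suma1) else False  # si las sumas de las mitades es igual el retorno es verdadero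
--
--     #  Si la cifra son solo dos dígitos se comprueba si son iguales, si lo son, se retorna verdadero
--     elif len_num == 2:
--         r = True if int(mi_numero[0]) == int(mi_numero[1]) else False
--     # La cifra es impar, y se retorna una excepción al usuario
--     else:
--         raise Exception("Número impar")
--     return r
-- ===== SOURCE B (Python) =====
-- def es_simetrico(n: int = 1) -> bool:
--     # Same guards as the original, then a purely arithmetic traversal (no str()).
--     if type(n) is not int:
--         raise TypeError("Error de tipo, solo enteros")
--     if n < 10 or n > 10E6:
--         raise ValueError("Número debe ser 10<= n <= 10,000,000")
--     digits = 0
--     m = n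
--     while m > 0:
--         digits += 1
--         m //= 10
--     if digits % 2:
--         raise Exception("Número impar")
--     half = digits // 2
--     left = n // 10 ** half
--     right = n % 10 ** half
--     suma_izq = 0
--     while left > 0:
--         suma_izq += left % 10
--         left //= 10
--     suma_der = 0
--     while right > 0:
--         suma_der += right % 10
--         right //= 10
--     return suma_izq == suma_der
-- ===== Notes on version B (the rewrite author's own statement) =====
-- stated objective: alternative
-- what changed: B replaces the str()/slice/list-comprehension pipeline by a purely arithmetic traversal: it counts digits by repeated floor division, splits n with // and % by 10**half, and sums each side's digits with modulo/division loops, subsuming the two-digit case with no special branch.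
import Mathlib
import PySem

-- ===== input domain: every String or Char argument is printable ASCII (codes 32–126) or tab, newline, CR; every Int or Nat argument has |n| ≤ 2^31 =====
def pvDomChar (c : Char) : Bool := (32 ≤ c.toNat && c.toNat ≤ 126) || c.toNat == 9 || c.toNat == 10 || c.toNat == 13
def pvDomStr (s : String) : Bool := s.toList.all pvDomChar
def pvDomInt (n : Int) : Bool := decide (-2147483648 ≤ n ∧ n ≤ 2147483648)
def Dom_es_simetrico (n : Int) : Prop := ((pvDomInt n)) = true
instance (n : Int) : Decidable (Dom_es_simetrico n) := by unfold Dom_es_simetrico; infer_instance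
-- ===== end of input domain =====

-- B replaces A's str()/slice pipeline by a purely arithmetic digit traversal (alternative, same cost).

-- ===== PORT A =====
-- int(c) for a single character c (always a decimal digit where A reaches it, so getD 0 never fires)
def pvCharVal (c : Char) : Int := (PySem.Int.ofChars? [c]).getD 0

def es_simetrico (n : Int) : Bool :=
  if n < 10 ∨ n > 10000000 then false  -- Python raises ValueError here; excluded by Pre_
  else
    let miNumero := PySem.Int.toChars n   -- str(n) handled as its character list
    let lenNum := miNumero.length
    if lenNum % 2 = 0 ∧ lenNum > 2 then
      let limite := lenNum / 2
      let suma0 := (PySem.List.slice miNumero none (some (limite : Int))).map pvCharVal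
      let suma1 := (PySem.List.slice miNumero (some (-(limite : Int))) none).map pvCharVal
      decide (suma0.sum = suma1.sum)
    else if lenNum = 2 then
      -- indices 0 and 1 are always in range in this branch (length = 2), so the defaults never fire
      decide (pvCharVal (PySem.List.pyGetD miNumero 0 '0') = pvCharVal (PySem.List.pyGetD miNumero 1 '0'))
    else false  -- Python raises Exception("Número impar") here; excluded by Pre_

-- ===== PORT B =====
-- the 'while m > 0' counting loop of Source B; the loop variable is nonnegative wherever B reaches it
def pvCountDigits (m : Nat) : Nat :=
  if h : m = 0 then 0 else 1 + pvCountDigits (m / 10)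
decreasing_by exact Nat.div_lt_self (Nat.pos_of_ne_zero h) (by omega)

-- the 'while m > 0: s += m % 10; m //= 10' digit-sum loop of Source B
def pvSumDigits (m : Nat) : Nat :=
  if h : m = 0 then 0 else m % 10 + pvSumDigits (m / 10)
decreasing_by exact Nat.div_lt_self (Nat.pos_of_ne_zero h) (by omega)

def es_simetrico_alt (n : Int) : Bool :=
  if n < 10 ∨ n > 10000000 then false  -- Python raises ValueError here; excluded by Pre_
  else
    let digits := pvCountDigits n.toNat  -- n ≥ 10 here, so n.toNat is n
    if digits % 2 ≠ 0 then false  -- Python raises Exception("Número impar") here; excluded by Pre_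
    else
      let half := digits / 2
      let left := n.toNat / 10 ^ half
      let right := n.toNat % 10 ^ half
      decide (pvSumDigits left = pvSumDigits right)

-- ===== PRECONDITION & SPEC =====
-- Pre_ is exactly where A returns: 10 ≤ n ≤ 10E6 (else ValueError/TypeError) with an even
-- number of decimal digits (else Exception("Número impar")); note 10000000 has 8 digits.
def Pre_es_simetrico (n : Int) : Prop :=
  (10 ≤ n ∧ n < 100) ∨ (1000 ≤ n ∧ n < 10000) ∨ (100000 ≤ n ∧ n < 1000000) ∨ n = 10000000
instance (n : Int) : Decidable (Pre_es_simetrico n) := by unfold Pre_es_simetrico; infer_instance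

def pvWitness_es_simetrico : Int := (1230)

def Spec_es_simetrico (n : Int) (out : Bool) : Prop := out = es_simetrico_alt n
instance (n : Int) (out : Bool) : Decidable (Spec_es_simetrico n out) := by unfold Spec_es_simetrico; infer_instance

-- ===== CLAIM (what is proved, stated in full; the proofs are below) =====
def Claim_equal_es_simetrico : Prop := ∀ (n : Int), Dom_es_simetrico n → Pre_es_simetrico n → Spec_es_simetrico n (es_simetrico n)

-- ===== LEMMAS AND PROOFS =====

-- fixed-width (h digits, leading zeros) decimal rendering of b < 10^h; proof-only helper
def pvPad (h b : Nat) : List Char :=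
  match h with
  | 0 => []
  | h + 1 => pvPad h (b / 10) ++ [Nat.digitChar (b % 10)]

lemma pv_core_append (b f : Nat) : ∀ (n : Nat) (l : List Char),
    Nat.toDigitsCore b f n l = Nat.toDigitsCore b f n [] ++ l := by
  induction f with
  | zero => intro n l; simp [Nat.toDigitsCore]
  | succ f ih =>
    intro n l
    simp only [Nat.toDigitsCore]
    by_cases h : n / b = 0
    · simp [h]
    · simp only [h, if_false]
      rw [ih (n / b) (Nat.digitChar (n % b) :: l), ih (n / b) [Nat.digitChar (n % b)]]
      simp

lemma pv_core_fuel (n : Nat) : ∀ (f f' : Nat), n < f → n < f' →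
    Nat.toDigitsCore 10 f n [] = Nat.toDigitsCore 10 f' n [] := by
  induction n using Nat.strong_induction_on with
  | _ n ih =>
    intro f f' hf hf'
    obtain ⟨g, rfl⟩ : ∃ g, f = g + 1 := ⟨f - 1, by omega⟩
    obtain ⟨g', rfl⟩ : ∃ g', f' = g' + 1 := ⟨f' - 1, by omega⟩
    simp only [Nat.toDigitsCore]
    by_cases h : n / 10 = 0
    · simp [h]
    · simp only [h, if_false]
      rw [pv_core_append 10 g, pv_core_append 10 g']
      have hlt : n / 10 < n := Nat.div_lt_self (by omega) (by omega)
      rw [ih (n / 10) hlt g g' (by omega) (by omega)]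

lemma pv_toDigits_lt (n : Nat) (h : n < 10) : Nat.toDigits 10 n = [Nat.digitChar n] := by
  have h1 : n / 10 = 0 := Nat.div_eq_of_lt h
  have h2 : n % 10 = n := Nat.mod_eq_of_lt h
  simp [Nat.toDigits, Nat.toDigitsCore, h1, h2]

lemma pv_toDigits_ge (n : Nat) (h : 10 ≤ n) :
    Nat.toDigits 10 n = Nat.toDigits 10 (n / 10) ++ [Nat.digitChar (n % 10)] := by
  have h0 : n / 10 ≠ 0 := by omega
  have hlt : n / 10 < n := Nat.div_lt_self (by omega) (by omega)
  have step : Nat.toDigits 10 n = Nat.toDigitsCore 10 n (n / 10) [Nat.digitChar (n % 10)] := by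
    simp [Nat.toDigits, Nat.toDigitsCore, h0]
  rw [step, pv_core_append 10 n]
  rw [pv_core_fuel (n / 10) n (n / 10 + 1) hlt (by omega)]
  rfl

lemma pv_toDigits_split (h : Nat) : ∀ (a b : Nat), 1 ≤ a → b < 10 ^ h →
    Nat.toDigits 10 (a * 10 ^ h + b) = Nat.toDigits 10 a ++ pvPad h b := by
  induction h with
  | zero =>
    intro a b _ hb
    interval_cases b
    simp [pvPad]
  | succ h ih =>
    intro a b ha hb
    have hge : 10 ≤ a * 10 ^ (h + 1) + b := by
      have : 10 ^ (h + 1) ≤ a * 10 ^ (h + 1) := Nat.le_mul_of_pos_left _ ha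
      have : 10 ≤ 10 ^ (h + 1) := by
        calc 10 = 10 ^ 1 := by norm_num
        _ ≤ 10 ^ (h + 1) := Nat.pow_le_pow_right (by omega) (by omega)
      omega
    have hdiv : (a * 10 ^ (h + 1) + b) / 10 = a * 10 ^ h + b / 10 := by
      have : a * 10 ^ (h + 1) + b = 10 * (a * 10 ^ h) + b := by ring
      rw [this, Nat.mul_add_div (by omega)]
    have hmod : (a * 10 ^ (h + 1) + b) % 10 = b % 10 := by
      have : a * 10 ^ (h + 1) + b = 10 * (a * 10 ^ h) + b := by ring
      rw [this, Nat.mul_add_mod]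
    rw [pv_toDigits_ge _ hge, hdiv, hmod,
      ih a (b / 10) ha (by
        apply Nat.div_lt_of_lt_mul
        calc b < 10 ^ (h + 1) := hb
        _ = 10 * 10 ^ h := by ring)]
    simp [pvPad]

lemma pv_toDigits_len (k : Nat) : ∀ m, 10 ^ k ≤ m → m < 10 ^ (k + 1) →
    (Nat.toDigits 10 m).length = k + 1 := by
  induction k with
  | zero =>
    intro m h1 h2
    have h2' : m < 10 := by simpa using h2
    rw [pv_toDigits_lt m h2']
    rfl
  | succ k ih =>
    intro m h1 h2
    have hge : 10 ≤ m := by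
      have : 10 ≤ 10 ^ (k + 1) := by
        calc 10 = 10 ^ 1 := by norm_num
        _ ≤ 10 ^ (k + 1) := Nat.pow_le_pow_right (by omega) (by omega)
      omega
    rw [pv_toDigits_ge m hge]
    rw [List.length_append]
    rw [ih (m / 10) (by rw [Nat.le_div_iff_mul_le (by omega)]; calc 10 ^ k * 10 = 10 ^ (k+1) := by ring
                         _ ≤ m := h1)
        (by apply Nat.div_lt_of_lt_mul
            calc m < 10 ^ (k + 1 + 1) := h2
            _ = 10 * 10 ^ (k + 1) := by ring)]
    rfl

lemma pv_countDigits_rec (m : Nat) (h : m ≠ 0) : pvCountDigits m = 1 + pvCountDigits (m / 10) := by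
  conv_lhs => rw [pvCountDigits]
  rw [dif_neg h]

lemma pv_countDigits_zero : pvCountDigits 0 = 0 := by
  rw [pvCountDigits]
  simp

lemma pv_countDigits_len (k : Nat) : ∀ m, 10 ^ k ≤ m → m < 10 ^ (k + 1) →
    pvCountDigits m = k + 1 := by
  induction k with
  | zero =>
    intro m h1 h2
    have h1' : 1 ≤ m := by simpa using h1
    have h2' : m < 10 := by simpa using h2
    rw [pv_countDigits_rec m (by omega), Nat.div_eq_of_lt h2', pv_countDigits_zero]
  | succ k ih =>
    intro m h1 h2
    have hge : 10 ≤ m := by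
      have : 10 ≤ 10 ^ (k + 1) := by
        calc 10 = 10 ^ 1 := by norm_num
        _ ≤ 10 ^ (k + 1) := Nat.pow_le_pow_right (by omega) (by omega)
      omega
    rw [pv_countDigits_rec m (by omega)]
    rw [ih (m / 10) (by rw [Nat.le_div_iff_mul_le (by omega)]; calc 10 ^ k * 10 = 10 ^ (k+1) := by ring
                         _ ≤ m := h1)
        (by apply Nat.div_lt_of_lt_mul
            calc m < 10 ^ (k + 1 + 1) := h2
            _ = 10 * 10 ^ (k + 1) := by ring)]
    omega

lemma pv_charVal_digitChar (d : Nat) (h : d < 10) : pvCharVal (Nat.digitChar d) = (d : Int) := by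
  interval_cases d <;> decide

lemma pv_sumDigits_zero : pvSumDigits 0 = 0 := by
  rw [pvSumDigits]
  simp

lemma pv_sumDigits_rec (m : Nat) : pvSumDigits m = m % 10 + pvSumDigits (m / 10) := by
  by_cases h : m = 0
  · subst h; simp [pv_sumDigits_zero]
  · conv_lhs => rw [pvSumDigits]
    rw [dif_neg h]

lemma pv_sumDigits_lt (m : Nat) (h : m < 10) : pvSumDigits m = m := by
  rw [pv_sumDigits_rec m, Nat.mod_eq_of_lt h, Nat.div_eq_of_lt h, pv_sumDigits_zero]
  omega

lemma pv_sum_toDigits (m : Nat) : 1 ≤ m →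
    ((Nat.toDigits 10 m).map pvCharVal).sum = (pvSumDigits m : Int) := by
  induction m using Nat.strong_induction_on with
  | _ m ih =>
    intro hm
    by_cases h : m < 10
    · rw [pv_toDigits_lt m h]
      rw [pv_sumDigits_rec m, Nat.mod_eq_of_lt h, Nat.div_eq_of_lt h]
      simp [pv_charVal_digitChar m h, pvSumDigits]
    · rw [pv_toDigits_ge m (by omega)]
      rw [List.map_append, List.sum_append]
      rw [ih (m / 10) (Nat.div_lt_self (by omega) (by omega)) (by
        rw [Nat.le_div_iff_mul_le (by omega)]; omega)]
      rw [pv_sumDigits_rec m]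
      simp [pv_charVal_digitChar (m % 10) (Nat.mod_lt m (by omega))]
      ring

lemma pv_sum_pad (h : Nat) : ∀ b, b < 10 ^ h →
    ((pvPad h b).map pvCharVal).sum = (pvSumDigits b : Int) := by
  induction h with
  | zero =>
    intro b hb
    interval_cases b
    simp [pvPad, pv_sumDigits_zero]
  | succ h ih =>
    intro b hb
    simp only [pvPad, List.map_append, List.sum_append]
    rw [ih (b / 10) (by
      rw [Nat.div_lt_iff_lt_mul (by omega)]
      calc b < 10 ^ (h + 1) := hb
      _ = 10 ^ h * 10 := by ring)]
    rw [pv_sumDigits_rec b]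
    simp [pv_charVal_digitChar (b % 10) (Nat.mod_lt b (by omega))]
    ring

lemma pv_key (hp m : Nat) (hp1 : 1 ≤ hp)
    (hm1 : 10 ^ (2 * hp - 1) ≤ m) (hm2 : m < 10 ^ (2 * hp)) (hle : m ≤ 10000000) :
    es_simetrico (m : Int) = es_simetrico_alt (m : Int) := by
  have hpow10 : 10 ≤ 10 ^ (2 * hp - 1) := by
    calc 10 = 10 ^ 1 := by norm_num
    _ ≤ 10 ^ (2 * hp - 1) := Nat.pow_le_pow_right (by omega) (by omega)
  have hm10 : 10 ≤ m := le_trans hpow10 hm1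
  have hguard : ¬ ((m : Int) < 10 ∨ (m : Int) > 10000000) := by omega
  have hppos : 0 < 10 ^ hp := Nat.pow_pos (by omega)
  have hb : m % 10 ^ hp < 10 ^ hp := Nat.mod_lt m hppos
  have ha2 : m / 10 ^ hp < 10 ^ hp := by
    apply Nat.div_lt_of_lt_mul
    calc m < 10 ^ (2 * hp) := hm2
    _ = 10 ^ hp * 10 ^ hp := by rw [← pow_add]; congr 1; omega
  have ha1 : 10 ^ (hp - 1) ≤ m / 10 ^ hp := by
    rw [Nat.le_div_iff_mul_le hppos]
    calc 10 ^ (hp - 1) * 10 ^ hp = 10 ^ (hp - 1 + hp) := by rw [pow_add]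
    _ = 10 ^ (2 * hp - 1) := by congr 1; omega
    _ ≤ m := hm1
  have ha0 : 1 ≤ m / 10 ^ hp := le_trans (Nat.one_le_pow _ _ (by omega)) ha1
  have hsplit := pv_toDigits_split hp (m / 10 ^ hp) (m % 10 ^ hp) ha0 hb
  rw [Nat.div_add_mod' m (10 ^ hp)] at hsplit
  have hLa : (Nat.toDigits 10 (m / 10 ^ hp)).length = hp := by
    have := pv_toDigits_len (hp - 1) (m / 10 ^ hp) ha1
      (by rw [show hp - 1 + 1 = hp by omega]; exact ha2)
    rw [show hp - 1 + 1 = hp by omega] at this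
    exact this
  have hLm : (Nat.toDigits 10 m).length = 2 * hp := by
    have := pv_toDigits_len (2 * hp - 1) m hm1
      (by rw [show 2 * hp - 1 + 1 = 2 * hp by omega]; exact hm2)
    rw [show 2 * hp - 1 + 1 = 2 * hp by omega] at this
    exact this
  have htoChars : PySem.Int.toChars (m : Int) = Nat.toDigits 10 m := by
    simp [PySem.Int.toChars, show ¬ ((m : Int) < 0) by omega]
  have hcount : pvCountDigits m = 2 * hp := by
    have := pv_countDigits_len (2 * hp - 1) m hm1
      (by rw [show 2 * hp - 1 + 1 = 2 * hp by omega]; exact hm2)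
    rw [show 2 * hp - 1 + 1 = 2 * hp by omega] at this
    omega
  -- B's side reduces to comparing the two arithmetic digit sums
  have hB : es_simetrico_alt (m : Int)
      = decide (pvSumDigits (m / 10 ^ hp) = pvSumDigits (m % 10 ^ hp)) := by
    simp only [es_simetrico_alt, if_neg hguard, Int.toNat_natCast, hcount]
    rw [if_neg (by omega)]
    rw [show 2 * hp / 2 = hp by omega]
  rw [hB]
  -- A's side
  by_cases hhp : hp = 1
  · -- two-digit branch of A
    subst hhp
    have hA2 : m / 10 ^ 1 < 10 := by simpa using ha2
    have hB2 : m % 10 ^ 1 < 10 := by simpa using hb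
    have hcs : PySem.Int.toChars (m : Int)
        = [Nat.digitChar (m / 10 ^ 1), Nat.digitChar (m % 10 ^ 1)] := by
      rw [htoChars, hsplit, pv_toDigits_lt _ hA2]
      simp [pvPad]
    simp only [es_simetrico, if_neg hguard, hcs]
    rw [if_neg (by simp), if_pos (by simp)]
    rw [show PySem.List.pyGetD [Nat.digitChar (m / 10 ^ 1), Nat.digitChar (m % 10 ^ 1)] 0 '0'
        = Nat.digitChar (m / 10 ^ 1) from by simp [pysem]]
    rw [show PySem.List.pyGetD [Nat.digitChar (m / 10 ^ 1), Nat.digitChar (m % 10 ^ 1)] 1 '0'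
        = Nat.digitChar (m % 10 ^ 1) from by simp [pysem]]
    rw [pv_charVal_digitChar _ hA2, pv_charVal_digitChar _ hB2]
    rw [pv_sumDigits_lt _ hA2, pv_sumDigits_lt _ hB2]
    rw [decide_eq_decide]
    omega
  · -- the even, longer-than-two branch of A
    have hcond : (Nat.toDigits 10 m).length % 2 = 0 ∧ (Nat.toDigits 10 m).length > 2 := by
      rw [hLm]; omega
    simp only [es_simetrico, if_neg hguard, htoChars, if_pos hcond]
    have hlim : (Nat.toDigits 10 m).length / 2 = hp := by rw [hLm]; omega
    rw [hlim]
    rw [PySem.List.slice_to_natCast, PySem.List.slice_from_neg_natCast _ _ (by omega)]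
    rw [hLm, show 2 * hp - hp = hp by omega]
    rw [hsplit, List.take_left' hLa, List.drop_left' hLa]
    rw [pv_sum_toDigits (m / 10 ^ hp) ha0]
    rw [pv_sum_pad hp (m % 10 ^ hp) hb]
    rw [decide_eq_decide]
    omega

-- ===== VERDICT (by name: the statement is the Claim_ definition above) =====
theorem es_simetrico_spec : Claim_equal_es_simetrico := by
  intro n _ hpre
  unfold Spec_es_simetrico
  have h0 : 0 ≤ n := by rcases hpre with h | h | h | h <;> omega
  lift n to Nat using h0 with m
  rcases hpre with h | h | h | h
  · exact pv_key 1 m (by omega) (by omega) (by omega) (by omega)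
  · exact pv_key 2 m (by omega) (by omega) (by omega) (by omega)
  · exact pv_key 3 m (by omega) (by omega) (by omega) (by omega)
  · exact pv_key 4 m (by omega) (by omega) (by omega) (by omega)
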